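-- pv_equiv track=rewrite | github.com/TasnadiAttila/AD22 | 3/a.py | getValueNagy
-- ===== SOURCE A (Python) =====
-- import string
--
-- nagy = list(string.ascii_uppercase)
--
-- def getValueNagy(d):
--     value = 27
--     for i in nagy:
--         if i == d:
--             break
--         else:
--             value = value + 1
--     return value
-- ===== SOURCE B (Python) =====
-- import string
--
-- nagy = list(string.ascii_uppercase)
--
-- def getValueNagy(d):
--     # closed form: 27 + alphabet position for uppercase letters, else 53
--     if d in nagy:
--         return 27 + ord(d) - ord('A')
--     return 53
-- ===== Notes on version B (the rewrite author's own statement) =====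
-- stated objective: idiomatic
-- what changed: Replaced the counting loop with break by a membership test plus the closed form 27 + ord(d) - 65, returning 53 directly for non-matching inputs.
import Mathlib
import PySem

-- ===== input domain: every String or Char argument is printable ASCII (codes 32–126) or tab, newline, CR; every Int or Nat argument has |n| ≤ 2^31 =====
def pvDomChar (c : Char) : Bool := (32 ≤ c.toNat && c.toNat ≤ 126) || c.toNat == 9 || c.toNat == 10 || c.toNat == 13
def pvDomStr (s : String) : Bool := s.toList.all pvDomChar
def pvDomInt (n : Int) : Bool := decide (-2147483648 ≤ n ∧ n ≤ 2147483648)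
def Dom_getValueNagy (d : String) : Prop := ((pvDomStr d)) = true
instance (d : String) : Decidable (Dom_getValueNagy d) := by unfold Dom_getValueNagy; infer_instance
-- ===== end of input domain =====

-- B replaces A's counting loop by a membership test and the closed form 27 + (code of d) - 65 (idiomatic).

-- ===== PORT A =====
-- nagy = list(string.ascii_uppercase): one-character strings "A".."Z"
def pvNagy : List String :=
  ["A","B","C","D","E","F","G","H","I","J","K","L","M",
   "N","O","P","Q","R","S","T","U","V","W","X","Y","Z"]

-- the for-loop with break: walk the list, +1 until a match, stop at a match
def pvLoopA : List String → Int → String → Int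
  | [], value, _ => value
  | i :: rest, value, d => if i = d then value else pvLoopA rest (value + 1) d

def getValueNagy (d : String) : Int := pvLoopA pvNagy 27 d

-- ===== PORT B =====
-- if d in nagy: return 27 + ord(d) - ord('A')  else return 53
def getValueNagy_alt (d : String) : Int :=
  if d ∈ pvNagy then
    match d.toList with
    | [c] => 27 + (c.toNat : Int) - 65
    | _ => 53    -- unreachable: members of pvNagy are single characters
  else 53

-- ===== PRECONDITION & SPEC =====
def Spec_getValueNagy (d : String) (out : Int) : Prop := out = getValueNagy_alt d
instance (d : String) (out : Int) : Decidable (Spec_getValueNagy d out) := by unfold Spec_getValueNagy; infer_instance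

-- ===== CLAIM (what is proved, stated in full; the proofs are below) =====
def Claim_equal_getValueNagy : Prop := ∀ (d : String), Dom_getValueNagy d → Spec_getValueNagy d (getValueNagy d)

-- ===== LEMMAS AND PROOFS =====

theorem pvLoopA_not_mem (l : List String) (v : Int) (d : String) (h : d ∉ l) :
    pvLoopA l v d = v + l.length := by
  induction l generalizing v with
  | nil => simp [pvLoopA]
  | cons i rest ih =>
    simp only [List.mem_cons, not_or] at h
    simp only [pvLoopA, if_neg (fun e => h.1 (Eq.symm e))]
    rw [ih _ h.2]
    simp only [List.length_cons]
    push_cast; ring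

-- ===== VERDICT (by name: the statement is the Claim_ definition above) =====
theorem getValueNagy_spec : Claim_equal_getValueNagy := by
  intro d _
  unfold Spec_getValueNagy getValueNagy getValueNagy_alt
  by_cases hm : d ∈ pvNagy
  · rw [if_pos hm]
    fin_cases hm <;> decide
  · rw [if_neg hm, pvLoopA_not_mem _ _ _ hm]
    decide
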